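-- pv_equiv track=rewrite | github.com/Veinerlein/python112 | Encode data on CD (Compact Disc) surface.py | encode_cd6
-- ===== SOURCE A (Python) =====
-- def encode_cd6(n):
--     en = bin(n)[2:].rjust(8, '0')[::-1]
--     res = "P"
--     for i in en:
--         if i == '0':
--             res+=res[-1]
--         elif res[-1] == 'P':
--             res+='L'
--         else:
--             res+='P'
--     return res
-- ===== SOURCE B (Python) =====
-- def encode_cd6(n):
--     bits = bin(n)[2:].rjust(8, '0')[::-1]
--     return ''.join('PL'[(k - bits[:k].count('0')) % 2] for k in range(len(bits) + 1))
-- ===== Notes on version B (the rewrite author's own statement) =====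
-- stated objective: alternative
-- what changed: B drops A's self-referential res[-1] append loop and instead derives each output character independently from a closed-form toggle-parity count (prefix length minus the prefix's zero-count, mod two) over the bit string, joining the mapped characters in one expression.
import Mathlib
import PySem

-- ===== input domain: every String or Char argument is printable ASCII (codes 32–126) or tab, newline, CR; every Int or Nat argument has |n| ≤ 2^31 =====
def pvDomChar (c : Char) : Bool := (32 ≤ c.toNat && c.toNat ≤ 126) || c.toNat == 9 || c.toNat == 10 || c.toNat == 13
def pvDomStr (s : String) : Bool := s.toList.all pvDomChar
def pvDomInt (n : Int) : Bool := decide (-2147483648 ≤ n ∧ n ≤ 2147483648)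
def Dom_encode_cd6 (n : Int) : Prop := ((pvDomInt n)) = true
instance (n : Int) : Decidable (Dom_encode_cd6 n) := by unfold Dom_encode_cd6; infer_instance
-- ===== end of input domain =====

-- B replaces A's self-referential res[-1] append loop by a closed-form per-position parity count (no state threaded through the output); objective: alternative.

-- ===== PORT A =====
-- bin(n)[2:].rjust(8,'0')[::-1]; drop 2 = xs[2:] (slice_from_natCast), .reverse = xs[::-1] (slice?_none_none_neg_one)
def encode_cd6_en (n : Int) : List Char :=
  let s := (PySem.Int.toBinChars0b n).drop 2
  (if s.length < 8 then List.replicate (8 - s.length) '0' ++ s else s).reverse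

-- loop body; res[-1] read as getLastD 'P' (res starts as "P" and only grows, so pyGet? res (-1) never raises)
def encode_cd6_step (res : List Char) (i : Char) : List Char :=
  if i = '0' then res ++ [res.getLast?.getD 'P']
  else if res.getLast?.getD 'P' = 'P' then res ++ ['L']
  else res ++ ['P']

def encode_cd6 (n : Int) : String :=
  String.mk ((encode_cd6_en n).foldl encode_cd6_step ['P'])

-- ===== PORT B =====
def encode_cd6_alt_bits (n : Int) : List Char :=
  let s := (PySem.Int.toBinChars0b n).drop 2
  (if s.length < 8 then List.replicate (8 - s.length) '0' ++ s else s).reverse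

-- 'PL'[j] with j = (k - bits[:k].count('0')) % 2 ∈ {0,1} (mod_nonneg/mod_lt), written as the if
def encode_cd6_alt (n : Int) : String :=
  String.mk ((List.range ((encode_cd6_alt_bits n).length + 1)).map (fun (k : Nat) =>
    if PySem.Int.mod ((k : Int) - ((((encode_cd6_alt_bits n).take k).count '0' : Nat) : Int)) 2 = 1
    then 'L' else 'P'))

-- ===== PRECONDITION & SPEC =====
def Spec_encode_cd6 (n : Int) (out : String) : Prop := out = encode_cd6_alt n
instance (n : Int) (out : String) : Decidable (Spec_encode_cd6 n out) := by unfold Spec_encode_cd6; infer_instance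

-- ===== CLAIM (what is proved, stated in full; the proofs are below) =====
def Claim_equal_encode_cd6 : Prop := ∀ (n : Int), Dom_encode_cd6 n → Spec_encode_cd6 n (encode_cd6 n)

-- ===== LEMMAS AND PROOFS =====

/-- the pit/land character for a toggle parity -/
def pvChar (p : Bool) : Char := if p then 'L' else 'P'

/-- reference NRZI encoding: emit the running parity after each char ('0' keeps, others toggle) -/
def pvNrzi : Bool → List Char → List Char
  | _, [] => []
  | p, c :: t => let p' := if c = '0' then p else !p; pvChar p' :: pvNrzi p' t

/-- toggle parity of a char list: non-'0' chars toggle -/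
def pvPar (xs : List Char) : Bool := decide ((xs.length - xs.count '0') % 2 = 1)

theorem pvPar_snoc (pre : List Char) (c : Char) :
    pvPar (pre ++ [c]) = if c = '0' then pvPar pre else !(pvPar pre) := by
  have hle : pre.count '0' ≤ pre.length := List.count_le_length
  unfold pvPar
  by_cases h : c = '0'
  · have : (pre ++ [c]).length - (pre ++ [c]).count '0' = pre.length - pre.count '0' := by
      simp [List.count_append, h]
    rw [this]; simp [h]
  · have : (pre ++ [c]).length - (pre ++ [c]).count '0' = (pre.length - pre.count '0') + 1 := by
      simp [List.count_append, h]
      omega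
    rw [this]
    rcases Nat.mod_two_eq_zero_or_one (pre.length - pre.count '0') with hm | hm <;>
      simp [h, Nat.add_mod, hm]

theorem pvA_fold (l : List Char) (res : List Char) (p : Bool)
    (h : res.getLast?.getD 'P' = pvChar p) :
    l.foldl encode_cd6_step res = res ++ pvNrzi p l := by
  induction l generalizing res p with
  | nil => simp [pvNrzi]
  | cons c t ih =>
    have hstep : encode_cd6_step res c = res ++ [pvChar (if c = '0' then p else !p)] := by
      unfold encode_cd6_step
      by_cases hc : c = '0'
      · simp [hc, h]
      · cases p <;> simp [hc, h, pvChar]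
    have hlast : (res ++ [pvChar (if c = '0' then p else !p)]).getLast?.getD 'P'
        = pvChar (if c = '0' then p else !p) := by
      simp
    simp only [List.foldl_cons, hstep, ih _ _ hlast, pvNrzi, List.append_assoc,
      List.singleton_append]

theorem pvB_map (s : List Char) (pre : List Char) :
    (List.range' (pre.length + 1) s.length).map
        (fun k => pvChar (pvPar ((pre ++ s).take k)))
      = pvNrzi (pvPar pre) s := by
  induction s generalizing pre with
  | nil => simp [pvNrzi]
  | cons c t ih =>
    have htake : (pre ++ c :: t).take (pre.length + 1) = pre ++ [c] := by
      rw [List.take_append]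
      simp
    have hrest : pre ++ c :: t = (pre ++ [c]) ++ t := by simp
    have hlen : pre.length + 1 + 1 = (pre ++ [c]).length + 1 := by simp
    simp only [List.length_cons, List.range'_succ, List.map_cons, htake]
    rw [hrest, hlen, ih (pre ++ [c])]
    simp [pvNrzi, pvPar_snoc]

theorem pvB_elem (bits : List Char) (k : Nat) (hk : k ≤ bits.length) :
    (if PySem.Int.mod ((k : Int) - (((bits.take k).count '0' : Nat) : Int)) 2 = 1 then 'L' else 'P')
      = pvChar (pvPar (bits.take k)) := by
  have hlen : (bits.take k).length = k := by simp [hk]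
  have hcnt : (bits.take k).count '0' ≤ k := by
    have := List.count_le_length (a := '0') (l := bits.take k)
    omega
  have hdiff : (k : Int) - (((bits.take k).count '0' : Nat) : Int)
      = (((k - (bits.take k).count '0' : Nat)) : Int) := by omega
  rw [hdiff, PySem.Int.mod_eq_emod_of_pos (by norm_num)]
  unfold pvChar pvPar
  rw [hlen]
  have hcast : ((k - (bits.take k).count '0' : Nat) : Int) % 2
      = (((k - (bits.take k).count '0') % 2 : Nat) : Int) := by omega
  rw [hcast]
  rcases Nat.mod_two_eq_zero_or_one (k - (bits.take k).count '0') with h | h <;>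
    simp [h]

theorem pv_alt_eq (n : Int) :
    encode_cd6_alt n
      = String.mk ('P' :: pvNrzi false (encode_cd6_alt_bits n)) := by
  unfold encode_cd6_alt
  congr 1
  set bits := encode_cd6_alt_bits n with hb
  show (List.range (bits.length + 1)).map
      (fun (k : Nat) => if PySem.Int.mod ((k : Int) - (((bits.take k).count '0' : Nat) : Int)) 2 = 1 then 'L' else 'P')
    = 'P' :: pvNrzi false bits
  have hcong : (List.range (bits.length + 1)).map
      (fun (k : Nat) => if PySem.Int.mod ((k : Int) - (((bits.take k).count '0' : Nat) : Int)) 2 = 1 then 'L' else 'P')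
      = (List.range (bits.length + 1)).map (fun k => pvChar (pvPar (bits.take k))) := by
    apply List.map_congr_left
    intro k hkmem
    exact pvB_elem bits k (by simpa [Nat.lt_succ_iff] using List.mem_range.mp hkmem)
  rw [hcong]
  have hr : List.range (bits.length + 1) = 0 :: List.range' 1 bits.length := by
    rw [List.range_eq_range', List.range'_succ]
  rw [hr, List.map_cons]
  have := pvB_map bits ([] : List Char)
  simp only [List.nil_append, List.length_nil, Nat.zero_add] at this
  rw [this]
  simp [pvChar, pvPar]

-- ===== VERDICT (by name: the statement is the Claim_ definition above) =====
theorem encode_cd6_spec : Claim_equal_encode_cd6 := by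
  intro n _
  show encode_cd6 n = encode_cd6_alt n
  rw [pv_alt_eq]
  unfold encode_cd6
  have hen : encode_cd6_en n = encode_cd6_alt_bits n := rfl
  rw [hen, pvA_fold (encode_cd6_alt_bits n) ['P'] false (by simp [pvChar])]
  rfl
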